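-- pv_equiv track=rewrite | github.com/alemishch/geolapp | app/frontend/photo_handler.py | map_photos
-- ===== SOURCE A (Python) =====
-- def map_photos(photos_data, expected_types):
--     """
--     Maps each expected photo type to its corresponding path.
--
--     Args:
--         photos_data (List[dict]): List of photo records fetched from the API.
--         expected_types (List[str]): List of expected photo types.
--
--     Returns:
--         dict: Mapping of photo types to their paths.
--     """
--     photos_map = {ptype: None for ptype in expected_types}
--     for record in photos_data:
--         for ptype in expected_types:
--             path = record.get(ptype)
--             if path:
--                 # Remove 'img/' prefix if present
--                 if path.startswith("img/"):
--                     path = path[4:]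
--                 photos_map[ptype] = path
--     return photos_map
-- ===== SOURCE B (Python) =====
-- def map_photos(photos_data, expected_types):
--     """Maps each expected photo type to its corresponding path.
--
--     Per-type early-exit reverse scan: for each ptype, take the first truthy
--     path found scanning photos_data from the end (== last write of A).
--     """
--     def find(ptype):
--         for record in reversed(photos_data):
--             path = record.get(ptype)
--             if path:
--                 return path[4:] if path.startswith("img/") else path
--         return None
--     return {ptype: find(ptype) for ptype in expected_types}
-- ===== Notes on version B (the rewrite author's own statement) =====
-- stated objective: alternative
-- what changed: Replaces A's overwrite-on-every-record double sweep (every record visited for every type, last truthy write wins) with a per-type reverse scan of photos_data that early-exits at the first truthy path; the dict is built once per type instead of being repeatedly overwritten.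
import Mathlib
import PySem

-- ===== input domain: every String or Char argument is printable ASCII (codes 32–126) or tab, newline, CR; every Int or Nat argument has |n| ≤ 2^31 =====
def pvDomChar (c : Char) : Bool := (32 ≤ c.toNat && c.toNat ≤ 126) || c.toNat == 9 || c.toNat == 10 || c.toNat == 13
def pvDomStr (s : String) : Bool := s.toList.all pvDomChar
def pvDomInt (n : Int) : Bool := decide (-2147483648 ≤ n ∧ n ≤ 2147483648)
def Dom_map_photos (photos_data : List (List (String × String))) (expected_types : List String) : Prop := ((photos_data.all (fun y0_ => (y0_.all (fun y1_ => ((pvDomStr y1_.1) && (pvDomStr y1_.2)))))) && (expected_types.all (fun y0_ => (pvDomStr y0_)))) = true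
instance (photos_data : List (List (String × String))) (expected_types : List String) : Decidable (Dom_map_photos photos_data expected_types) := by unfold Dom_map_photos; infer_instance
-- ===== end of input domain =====

-- B replaces A's overwrite-on-every-record double sweep with a per-type early-exit
-- reverse scan (same result: last truthy write = first truthy hit in reverse); alternative decomposition, not claimed faster.


-- ===== PORT A =====
-- record.get(k): first match in the association list (Python dict lookup)
def pvRGet : List (String × String) → String → Option String
  | [], _ => none
  | (a, b) :: rs, k => if a == k then some b else pvRGet rs k

-- strip a leading 'img/' (path[4:]) if present
def pvProc (p : String) : String :=
  if PySem.Str.startswith p "img/" then PySem.Str.slice p (some 4) none else p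

def map_photos (photos_data : List (List (String × String))) (expected_types : List String) : List (String × Option String) :=
  let photos_map : PySem.Dict String (Option String) :=
    expected_types.foldl (fun d ptype => d.insert ptype (none : Option String)) PySem.Dict.empty
  let photos_map :=
    photos_data.foldl (fun d record =>
      expected_types.foldl (fun d ptype =>
        match pvRGet record ptype with
        | some path => if path ≠ "" then d.insert ptype (some (pvProc path)) else d
        | none => d) d) photos_map
  photos_map.items

-- ===== PORT B =====
-- find(ptype): scan the (reversed) records, return the first truthy path, processed
def pvScan : List (List (String × String)) → String → Option String
  | [], _ => none
  | r :: rs, t =>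
    match pvRGet r t with
    | some path => if path ≠ "" then some (pvProc path) else pvScan rs t
    | none => pvScan rs t

def map_photos_alt (photos_data : List (List (String × String))) (expected_types : List String) : List (String × Option String) :=
  (expected_types.foldl
    (fun d ptype => d.insert ptype (pvScan photos_data.reverse ptype))
    (PySem.Dict.empty : PySem.Dict String (Option String))).items

-- ===== PRECONDITION & SPEC =====
def Spec_map_photos (photos_data : List (List (String × String))) (expected_types : List String) (out : List (String × Option String)) : Prop := out = map_photos_alt photos_data expected_types
instance (photos_data : List (List (String × String))) (expected_types : List String) (out : List (String × Option String)) : Decidable (Spec_map_photos photos_data expected_types out) := by unfold Spec_map_photos; infer_instance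

-- ===== CLAIM (what is proved, stated in full; the proofs are below) =====
def Claim_equal_map_photos : Prop := ∀ (photos_data : List (List (String × String))) (expected_types : List String), Dom_map_photos photos_data expected_types → Spec_map_photos photos_data expected_types (map_photos photos_data expected_types)

-- ===== LEMMAS AND PROOFS =====

-- the first-truthy hit of a single record, processed
def pvHit (r : List (String × String)) (t : String) : Option String :=
  match pvRGet r t with
  | some p => if p ≠ "" then some (pvProc p) else none
  | none => none

-- A's inner step, named
def pvStepA (r : List (String × String)) (d : PySem.Dict String (Option String)) (t : String) :
    PySem.Dict String (Option String) :=
  match pvRGet r t with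
  | some path => if path ≠ "" then d.insert t (some (pvProc path)) else d
  | none => d

lemma pvStepA_eq (r d t) : pvStepA r d t =
    match pvHit r t with
    | some v => d.insert t (some v)
    | none => d := by
  unfold pvStepA pvHit
  cases pvRGet r t with
  | none => rfl
  | some p => by_cases h : p = "" <;> simp [h]

lemma pvScan_singleton (r t) : pvScan [r] t = pvHit r t := by
  unfold pvScan pvHit
  cases pvRGet r t with
  | none => rfl
  | some p => by_cases h : p = "" <;> simp [h, pvScan]

lemma pvScan_append (xs ys : List (List (String × String))) (t : String) :
    pvScan (xs ++ ys) t =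
      match pvScan xs t with
      | some v => some v
      | none => pvScan ys t := by
  induction xs with
  | nil => simp [pvScan]
  | cons r rs ih =>
    simp only [List.cons_append, pvScan]
    cases pvRGet r t with
    | none => exact ih
    | some p => by_cases h : p = "" <;> simp [h, ih]

-- getD through A's inner fold over the types list
lemma innerA_getD (l : List String) (r : List (String × String))
    (d : PySem.Dict String (Option String)) (t : String) :
    (l.foldl (pvStepA r) d).getD t none =
      if t ∈ l then
        (match pvHit r t with
         | some v => some v
         | none => d.getD t none)
      else d.getD t none := by
  induction l generalizing d with
  | nil => simp
  | cons x l ih =>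
    simp only [List.foldl_cons, ih, List.mem_cons, pvStepA_eq]
    by_cases hx : t = x
    · subst hx
      cases hv : pvHit r t with
      | some v => simp
      | none => simp
    · have hpres : (match pvHit r x with
          | some v => d.insert x (some v)
          | none => d).getD t none = d.getD t none := by
        cases pvHit r x with
        | some v => rw [PySem.Dict.getD_insert]; simp [hx]
        | none => rfl
      by_cases hl : t ∈ l <;> simp [hx, hl, hpres]

-- contains through A's inner fold
lemma innerA_contains (l : List String) (r : List (String × String))
    (d : PySem.Dict String (Option String)) (t : String) (h : d.contains t = true) :
    (l.foldl (pvStepA r) d).contains t = true := by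
  induction l generalizing d with
  | nil => exact h
  | cons x l ih =>
    apply ih
    rw [pvStepA_eq]
    cases pvHit r x with
    | some v => simp [PySem.Dict.contains_insert, h]
    | none => exact h

-- keys unchanged by A's inner fold when every type is already a key
lemma innerA_keys (l : List String) (r : List (String × String))
    (d : PySem.Dict String (Option String)) (h : ∀ t ∈ l, d.contains t = true) :
    (l.foldl (pvStepA r) d).keys = d.keys := by
  induction l generalizing d with
  | nil => rfl
  | cons x l ih =>
    simp only [List.foldl_cons]
    have hkx : (pvStepA r d x).keys = d.keys := by
      rw [pvStepA_eq]
      cases pvHit r x with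
      | some v =>
        apply PySem.Dict.keys_insert_of_contains
        exact h x (by simp)
      | none => rfl
    rw [ih _ (fun t ht => by
      rw [pvStepA_eq]
      cases pvHit r x with
      | some v => simp [PySem.Dict.contains_insert, h t (by simp [ht])]
      | none => exact h t (by simp [ht]))]
    exact hkx

-- getD through A's outer fold over the records
lemma outerA_getD (l : List String) (pd : List (List (String × String)))
    (d : PySem.Dict String (Option String)) (t : String) (ht : t ∈ l) :
    ((pd.foldl (fun d r => l.foldl (pvStepA r) d) d).getD t none) =
      match pvScan pd.reverse t with
      | some v => some v
      | none => d.getD t none := by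
  induction pd generalizing d with
  | nil => simp [pvScan]
  | cons r pd ih =>
    simp only [List.foldl_cons, ih, List.reverse_cons, pvScan_append, pvScan_singleton,
      innerA_getD, ht, if_pos]
    cases pvScan pd.reverse t with
    | some v => rfl
    | none => cases pvHit r t <;> rfl

-- keys unchanged by A's outer fold
lemma outerA_keys (l : List String) (pd : List (List (String × String)))
    (d : PySem.Dict String (Option String)) (h : ∀ t ∈ l, d.contains t = true) :
    (pd.foldl (fun d r => l.foldl (pvStepA r) d) d).keys = d.keys := by
  induction pd generalizing d with
  | nil => rfl
  | cons r pd ih =>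
    simp only [List.foldl_cons]
    rw [ih _ (fun t ht => innerA_contains l r d t (h t ht))]
    exact innerA_keys l r d h

-- the initial all-None dict: every lookup is none
lemma init_getD (l : List String) (d : PySem.Dict String (Option String)) (t : String)
    (h : d.getD t none = none) :
    (l.foldl (fun d x => d.insert x (none : Option String)) d).getD t none = none := by
  induction l generalizing d with
  | nil => exact h
  | cons x l ih =>
    apply ih
    rw [PySem.Dict.getD_insert]
    split <;> simp [h]

-- B's fold: lookup of a listed key is its scan value
lemma foldB_getD (l : List String) (g : String → Option String)
    (d : PySem.Dict String (Option String)) (t : String) (ht : t ∈ l) :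
    (l.foldl (fun d x => d.insert x (g x)) d).getD t none = g t := by
  induction l generalizing d with
  | nil => simp at ht
  | cons x l ih =>
    simp only [List.foldl_cons]
    by_cases hl : t ∈ l
    · exact ih _ hl
    · have hx : t = x := by rcases List.mem_cons.mp ht with h | h; exact h; exact absurd h hl
      subst hx
      have untouched : ∀ (l : List String) (d : PySem.Dict String (Option String)),
          t ∉ l → (l.foldl (fun d x => d.insert x (g x)) d).getD t none = d.getD t none := by
        intro l
        induction l with
        | nil => intro d _; rfl
        | cons y l ih2 =>
          intro d hn
          simp only [List.foldl_cons]
          have hne : t ≠ y := fun h => hn (by simp [h])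
          rw [ih2 _ (fun h => hn (List.mem_cons_of_mem _ h)), PySem.Dict.getD_insert]
          simp only [if_neg hne]
      rw [untouched l _ hl, PySem.Dict.getD_insert]
      simp

-- keys of an insert-only fold from empty
lemma keys_fold_insert (l : List String) (f : PySem.Dict String (Option String) → String → Option String) :
    (l.foldl (fun d x => d.insert x (f d x)) (PySem.Dict.empty : PySem.Dict String (Option String))).keys
      = PySem.Set.ofList l := by
  rw [PySem.Dict.keys_foldl_insert, PySem.Dict.keys_empty, PySem.Set.update_nil_left]

-- ===== VERDICT (by name: the statement is the Claim_ definition above) =====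
theorem map_photos_spec : Claim_equal_map_photos := by
  intro pd l _
  unfold Spec_map_photos map_photos map_photos_alt
  show (pd.foldl (fun d r => l.foldl (pvStepA r) d)
        (l.foldl (fun d t => d.insert t (none : Option String)) PySem.Dict.empty)).items
      = (l.foldl (fun d t => d.insert t (pvScan pd.reverse t)) PySem.Dict.empty).items
  have hinitkeys : (l.foldl (fun d t => d.insert t (none : Option String)) PySem.Dict.empty).keys
      = PySem.Set.ofList l := keys_fold_insert l (fun _ _ => none)
  have hinitcont : ∀ t ∈ l,
      (l.foldl (fun d t => d.insert t (none : Option String)) PySem.Dict.empty).contains t = true := by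
    intro t ht
    rw [PySem.Dict.contains_iff_mem_keys, hinitkeys]
    exact (PySem.Set.mem_ofList _ _).mpr ht
  have hAkeys : (pd.foldl (fun d r => l.foldl (pvStepA r) d)
        (l.foldl (fun d t => d.insert t (none : Option String)) PySem.Dict.empty)).keys
      = PySem.Set.ofList l := by
    rw [outerA_keys l pd _ hinitcont]; exact hinitkeys
  have hBkeys : (l.foldl (fun d t => d.insert t (pvScan pd.reverse t))
        (PySem.Dict.empty : PySem.Dict String (Option String))).keys = PySem.Set.ofList l :=
    keys_fold_insert l _
  have hAnodup := hAkeys ▸ PySem.Set.nodup_ofList l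
  have hBnodup := hBkeys ▸ PySem.Set.nodup_ofList l
  have hval : ∀ t ∈ l,
      (pd.foldl (fun d r => l.foldl (pvStepA r) d)
        (l.foldl (fun d t => d.insert t (none : Option String)) PySem.Dict.empty)).getD t none
      = (l.foldl (fun d t => d.insert t (pvScan pd.reverse t))
          (PySem.Dict.empty : PySem.Dict String (Option String))).getD t none := by
    intro t ht
    rw [outerA_getD l pd _ t ht,
      foldB_getD l (fun s => pvScan pd.reverse s) PySem.Dict.empty t ht,
      init_getD l PySem.Dict.empty t rfl]
    cases pvScan pd.reverse t <;> rfl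
  rw [PySem.Dict.items_eq_map_keys _ hAnodup none, PySem.Dict.items_eq_map_keys _ hBnodup none,
    hAkeys, hBkeys]
  apply List.map_congr_left
  intro k hk
  rw [hval k ((PySem.Set.mem_ofList _ _).mp hk)]
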